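-- pv_equiv track=rewrite | github.com/cpeck-rmvd/number_theory | diophantine_equations.py | find_tuples
-- ===== SOURCE A (Python) =====
-- import math
--
-- def find_tuples(num):
--   """Returns a list of all tuples (x, y, n) such that gcd(x, n + 1) = 1 and x^(n+1) = y^(n+1)"""
--   tuples = []
--   # we can use a simple brute-force approach to try all tuples (x, y, n)
--   for x in range(1, num + 1):
--     for y in range(1, num + 1):
--       for n in range(1, num + 1):
--         if math.gcd(x, n + 1) == 1 and x**(n+1) == y**(n+1):
--           tuples.append((x, y, n))
--   return tuples
-- ===== SOURCE B (Python) =====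
-- import math
--
-- def find_tuples(num):
--   """Returns a list of all tuples (x, y, n) such that gcd(x, n + 1) = 1 and x^(n+1) = y^(n+1)"""
--   # For positive x, y and exponent n+1 >= 2, x^(n+1) == y^(n+1) holds exactly when x == y,
--   # so the y-loop collapses and no big-integer powers are needed.
--   return [(x, x, n)
--           for x in range(1, num + 1)
--           for n in range(1, num + 1)
--           if math.gcd(x, n + 1) == 1]
-- ===== Notes on version B (the rewrite author's own statement) =====
-- stated objective: faster
-- what changed: Dropped the y-loop and the big-integer exponentiations: since x^(n+1)=y^(n+1) forces x=y for positive x,y, B emits (x,x,n) directly for every coprime pair, turning a triple loop with powers into a double loop with one gcd.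
import Mathlib
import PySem

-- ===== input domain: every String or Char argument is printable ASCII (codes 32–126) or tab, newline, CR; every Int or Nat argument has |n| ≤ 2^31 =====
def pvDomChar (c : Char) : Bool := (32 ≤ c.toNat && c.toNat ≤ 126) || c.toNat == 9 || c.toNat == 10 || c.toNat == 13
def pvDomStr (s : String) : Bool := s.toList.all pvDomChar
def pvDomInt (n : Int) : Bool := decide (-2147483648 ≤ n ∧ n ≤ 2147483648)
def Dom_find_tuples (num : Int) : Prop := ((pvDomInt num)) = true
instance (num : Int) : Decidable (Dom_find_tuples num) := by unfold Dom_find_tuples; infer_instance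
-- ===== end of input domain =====

-- B replaces A's triple loop with big-integer powers by a double loop using x^(n+1)=y^(n+1) ↔ x=y
-- for positive x, y (objective: faster, asymptotic).

-- ===== PORT A =====
-- triple nested for-loop appending (x, y, n) when gcd(x, n+1) == 1 and x**(n+1) == y**(n+1)
def find_tuples (num : Int) : List (List Int) :=
  (PySem.List.pyRange 1 (num + 1) 1).foldl (fun acc x =>
    (PySem.List.pyRange 1 (num + 1) 1).foldl (fun acc y =>
      (PySem.List.pyRange 1 (num + 1) 1).foldl (fun acc n =>
        if Int.gcd x (n + 1) == 1 && x ^ (n + 1).toNat == y ^ (n + 1).toNat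
        then acc ++ [[x, y, n]] else acc) acc) acc) []

-- ===== PORT B =====
-- comprehension over x and n only, emitting (x, x, n) when gcd(x, n+1) == 1
def find_tuples_alt (num : Int) : List (List Int) :=
  (PySem.List.pyRange 1 (num + 1) 1).flatMap (fun x =>
    ((PySem.List.pyRange 1 (num + 1) 1).filter (fun n => Int.gcd x (n + 1) == 1)).map
      (fun n => [x, x, n]))

-- ===== PRECONDITION & SPEC =====
def Spec_find_tuples (num : Int) (out : List (List Int)) : Prop := out = find_tuples_alt num
instance (num : Int) (out : List (List Int)) : Decidable (Spec_find_tuples num out) := by unfold Spec_find_tuples; infer_instance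

-- ===== CLAIM (what is proved, stated in full; the proofs are below) =====
def Claim_equal_find_tuples : Prop := ∀ (num : Int), Dom_find_tuples num → Spec_find_tuples num (find_tuples num)

-- ===== LEMMAS AND PROOFS =====

-- positive bases to an identical nonzero power are equal iff the bases are
theorem pv_pow_inj (x y : Int) (hx : 1 ≤ x) (hy : 1 ≤ y) (m : Nat) (hm : m ≠ 0)
    (h : x ^ m = y ^ m) : x = y := by
  rcases lt_trichotomy x y with hl | he | hl
  · have := pow_lt_pow_left₀ hl (by linarith) hm
    omega
  · exact he
  · have := pow_lt_pow_left₀ hl (by linarith) hm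
    omega

-- a flatMap that is empty everywhere except at one element of a Nodup list
theorem pv_flatMap_single {α β : Type} (l : List α) (hl : l.Nodup) (x : α) (hx : x ∈ l)
    (f : α → List β) (hf : ∀ y ∈ l, y ≠ x → f y = []) : l.flatMap f = f x := by
  induction l with
  | nil => cases hx
  | cons a t ih =>
    rcases List.mem_cons.1 hx with rfl | hxt
    · have ht : ∀ y ∈ t, f y = [] := fun y hy =>
        hf y (List.mem_cons_of_mem _ hy) (fun h => (List.nodup_cons.1 hl).1 (h ▸ hy))
      simp [List.flatMap_cons, List.flatMap_eq_nil_iff.2 ht]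
    · have ha : f a = [] :=
        hf a List.mem_cons_self (fun h => (List.nodup_cons.1 hl).1 (h ▸ hxt))
      simp [List.flatMap_cons, ha,
        ih (List.nodup_cons.1 hl).2 hxt (fun y hy => hf y (List.mem_cons_of_mem _ hy))]

-- ===== VERDICT (by name: the statement is the Claim_ definition above) =====
theorem find_tuples_spec : Claim_equal_find_tuples := by
  intro num _
  show find_tuples num = find_tuples_alt num
  unfold find_tuples find_tuples_alt
  simp only [PySem.List.foldl_append_if, PySem.List.foldl_append_eq_flatMap, List.nil_append]
  apply List.flatMap_congr
  intro x hx
  have hx1 : 1 ≤ x := (PySem.List.mem_pyRange_one.1 hx).1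
  rw [pv_flatMap_single _ (PySem.List.nodup_pyRange_one 1 (num + 1)) x hx]
  · -- at y = x the power test is identically true, leaving the gcd test alone
    apply congrArg
    apply List.filter_congr
    intro n _
    simp
  · -- for y ≠ x the power test fails on every n in range, so nothing is emitted
    intro y hy hne
    have hy1 : 1 ≤ y := (PySem.List.mem_pyRange_one.1 hy).1
    have : (PySem.List.pyRange 1 (num + 1)).filter
        (fun n => Int.gcd x (n + 1) == 1 && x ^ (n + 1).toNat == y ^ (n + 1).toNat) = [] := by
      apply List.filter_eq_nil_iff.2
      intro n hn
      have hn1 : 1 ≤ n := (PySem.List.mem_pyRange_one.1 hn).1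
      simp only [Bool.and_eq_true, beq_iff_eq, not_and]
      intro _ hpow
      exact hne (pv_pow_inj y x hy1 hx1 _ (by omega) hpow.symm)
    simp [this]
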